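-- pv_equiv track=rewrite | github.com/pieceofchocolatecake/auto-cyberchef | autochef/pipeline.py | _select_encoding
-- ===== SOURCE A (Python) =====
-- from typing import List, Tuple, Optional, Dict
--
-- LOW_CONFIDENCE_ENCODINGS = {"ROT13", "Caesar"}
--
-- def _select_encoding(encodings: List[str], tried: set) -> Optional[str]:
--     """
--     Select the next encoding to try from a detected list.
--
--     Prefers high-confidence encodings and skips anything already attempted
--     in this pipeline run.  Low-confidence encodings (ROT13, Caesar) are
--     deferred until no better options remain.
--
--     Args:
--         encodings: Detected encoding names in priority order.
--         tried:     Set of encoding names already attempted.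
--
--     Returns:
--         The chosen encoding name, or None if all have been tried.
--     """
--     # First pass: skip low-confidence and already-tried
--     for enc in encodings:
--         if enc not in tried and enc not in LOW_CONFIDENCE_ENCODINGS:
--             return enc
--     # Second pass: allow low-confidence if nothing else is available
--     for enc in encodings:
--         if enc not in tried:
--             return enc
--     return None
-- ===== SOURCE B (Python) =====
-- LOW_CONFIDENCE_ENCODINGS = {"ROT13", "Caesar"}
--
-- def _select_encoding(encodings, tried):
--     fallback = None
--     for enc in encodings:
--         if enc not in tried:
--             if enc not in LOW_CONFIDENCE_ENCODINGS:
--                 return enc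
--             if fallback is None:
--                 fallback = enc
--     return fallback
-- ===== Notes on version B (the rewrite author's own statement) =====
-- stated objective: alternative
-- what changed: Replaces A's two sequential scans with a single pass that returns the first untried high-confidence encoding immediately and tracks the first untried low-confidence one as a fallback.
import Mathlib
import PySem

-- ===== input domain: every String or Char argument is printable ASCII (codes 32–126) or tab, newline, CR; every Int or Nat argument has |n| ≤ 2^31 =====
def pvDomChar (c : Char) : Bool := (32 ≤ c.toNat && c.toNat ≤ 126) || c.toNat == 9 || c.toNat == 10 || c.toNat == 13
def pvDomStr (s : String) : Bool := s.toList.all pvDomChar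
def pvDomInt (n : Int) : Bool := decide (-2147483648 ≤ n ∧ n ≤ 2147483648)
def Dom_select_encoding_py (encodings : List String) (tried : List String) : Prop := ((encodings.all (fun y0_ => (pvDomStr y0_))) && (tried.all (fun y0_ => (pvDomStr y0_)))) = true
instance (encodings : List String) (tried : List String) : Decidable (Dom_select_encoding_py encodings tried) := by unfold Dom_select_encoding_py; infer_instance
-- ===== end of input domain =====

-- B does one pass with a fallback instead of A's two passes; objective: alternative decomposition, same result.

-- ===== PORT A =====
-- LOW_CONFIDENCE_ENCODINGS = {"ROT13", "Caesar"}
def lowConfidence (e : String) : Bool := e == "ROT13" || e == "Caesar"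

-- first pass: skip low-confidence and already-tried
def selPass1 : List String → List String → Option String
  | [], _ => none
  | e :: rest, tried =>
    if !tried.contains e && !lowConfidence e then some e else selPass1 rest tried

-- second pass: allow low-confidence if nothing else is available
def selPass2 : List String → List String → Option String
  | [], _ => none
  | e :: rest, tried =>
    if !tried.contains e then some e else selPass2 rest tried

def select_encoding_py (encodings : List String) (tried : List String) : Option String :=
  match selPass1 encodings tried with
  | some e => some e
  | none => selPass2 encodings tried

-- ===== PORT B =====
-- single pass carrying the fallback (first untried low-confidence encoding seen)
def selGo : List String → List String → Option String → Option String
  | [], _, fallback => fallback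
  | e :: rest, tried, fallback =>
    if !tried.contains e then
      if !lowConfidence e then some e
      else selGo rest tried (if fallback.isNone then some e else fallback)
    else selGo rest tried fallback

def select_encoding_py_alt (encodings : List String) (tried : List String) : Option String :=
  selGo encodings tried none

-- ===== PRECONDITION & SPEC =====
def Spec_select_encoding_py (encodings : List String) (tried : List String) (out : Option String) : Prop := out = select_encoding_py_alt encodings tried
instance (encodings : List String) (tried : List String) (out : Option String) : Decidable (Spec_select_encoding_py encodings tried out) := by unfold Spec_select_encoding_py; infer_instance

-- ===== CLAIM (what is proved, stated in full; the proofs are below) =====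
def Claim_equal_select_encoding_py : Prop := ∀ (encodings : List String) (tried : List String), Dom_select_encoding_py encodings tried → Spec_select_encoding_py encodings tried (select_encoding_py encodings tried)

-- ===== LEMMAS AND PROOFS =====
-- invariant of B's single pass: it is A's two passes with the fallback spliced in
lemma selGo_eq (encodings tried : List String) (fb : Option String) :
    selGo encodings tried fb =
      match selPass1 encodings tried with
      | some e => some e
      | none => match fb with
                | some f => some f
                | none => selPass2 encodings tried := by
  induction encodings generalizing fb with
  | nil => cases fb <;> simp [selGo, selPass1, selPass2]
  | cons e rest ih =>
    by_cases ht : e ∈ tried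
    · simp [selGo, selPass1, selPass2, ht, ih]
    · by_cases hl : lowConfidence e
      · cases fb <;> simp [selGo, selPass1, selPass2, ht, hl, ih]
      · simp [selGo, selPass1, ht, hl]

-- ===== VERDICT (by name: the statement is the Claim_ definition above) =====
theorem select_encoding_py_spec : Claim_equal_select_encoding_py := by
  intro encodings tried _
  unfold Spec_select_encoding_py select_encoding_py select_encoding_py_alt
  rw [selGo_eq]
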